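-- pv_equiv track=rewrite | github.com/devonquest/llms | run_llm_transformers_outline.py | is_flat_list
-- ===== SOURCE A (Python) =====
-- def is_flat_list(response):
--     lines = response.split('\n')
--     num_usable_lines = 0
--     for line in lines:
--         if line.startswith("-"):
--             num_usable_lines += 1
--         elif num_usable_lines > 0:
--             num_usable_lines = 0
--     return num_usable_lines >= 2
-- ===== SOURCE B (Python) =====
-- def is_flat_list(response):
--     count = 0
--     for line in reversed(response.split('\n')):
--         if line.startswith('-'):
--             count += 1
--         else:
--             break
--     return count >= 2
-- ===== Notes on version B (the rewrite author's own statement) =====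
-- stated objective: simpler
-- what changed: A's forward full scan with a reset counter is replaced by a reverse scan that counts the trailing run of dash-prefixed lines and breaks at the first non-dash line.
import Mathlib
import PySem

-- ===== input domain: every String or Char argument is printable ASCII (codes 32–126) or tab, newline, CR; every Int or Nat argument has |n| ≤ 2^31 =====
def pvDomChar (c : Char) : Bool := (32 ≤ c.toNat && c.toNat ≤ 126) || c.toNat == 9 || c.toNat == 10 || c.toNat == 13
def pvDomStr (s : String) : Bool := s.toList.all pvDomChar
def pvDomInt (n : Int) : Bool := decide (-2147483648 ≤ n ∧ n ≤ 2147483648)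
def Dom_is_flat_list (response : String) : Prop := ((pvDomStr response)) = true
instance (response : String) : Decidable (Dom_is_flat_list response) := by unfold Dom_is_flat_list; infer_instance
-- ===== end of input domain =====

-- B replaces A's forward full scan with a reset counter by a reverse scan that
-- counts the trailing run of dash-prefixed lines and stops at the first non-dash line (objective: simpler).


-- ===== PORT A =====
-- forward fold over the lines; counter increments on '-'-lines and resets to 0 otherwise
def is_flat_list (response : String) : Bool :=
  let lines := PySem.Chars.splitOn response.toList "\n".toList
  let num_usable_lines : Int :=
    lines.foldl (fun acc line =>
      if PySem.Chars.startswith line "-".toList then acc + 1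
      else if acc > 0 then 0 else acc) 0
  decide (num_usable_lines ≥ 2)

-- ===== PORT B =====
-- count of the leading '-'-run of the reversed line list (loop with break in Source B)
def pvTrailRun : List (List Char) → Nat
  | [] => 0
  | line :: rest => if PySem.Chars.startswith line "-".toList then pvTrailRun rest + 1 else 0

def is_flat_list_alt (response : String) : Bool :=
  decide (pvTrailRun (PySem.Chars.splitOn response.toList "\n".toList).reverse ≥ 2)

-- ===== PRECONDITION & SPEC =====
def Spec_is_flat_list (response : String) (out : Bool) : Prop := out = is_flat_list_alt response
instance (response : String) (out : Bool) : Decidable (Spec_is_flat_list response out) := by unfold Spec_is_flat_list; infer_instance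

-- ===== CLAIM (what is proved, stated in full; the proofs are below) =====
def Claim_equal_is_flat_list : Prop := ∀ (response : String), Dom_is_flat_list response → Spec_is_flat_list response (is_flat_list response)

-- ===== LEMMAS AND PROOFS =====

-- A's fold with reset equals the length of the trailing '-'-run
theorem pv_fold_eq_trail (xs : List (List Char)) :
    xs.foldl (fun (acc : Int) line =>
      if PySem.Chars.startswith line "-".toList then acc + 1
      else if acc > 0 then 0 else acc) 0
      = (pvTrailRun xs.reverse : Int) := by
  induction xs using List.reverseRecOn with
  | nil => simp [pvTrailRun]
  | append_singleton ys y ih =>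
    rw [List.foldl_append, List.reverse_append]
    simp only [List.foldl_cons, List.foldl_nil, List.reverse_singleton, List.singleton_append,
      pvTrailRun, ih]
    split_ifs <;> omega

-- ===== VERDICT (by name: the statement is the Claim_ definition above) =====
theorem is_flat_list_spec : Claim_equal_is_flat_list := by
  intro response _
  unfold Spec_is_flat_list is_flat_list is_flat_list_alt
  simp only [pv_fold_eq_trail]
  norm_num
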